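-- pv_equiv track=rewrite | github.com/M1nseoPark/CodingtestStudy | 후보키.py | solution
-- ===== SOURCE A (Python) =====
-- from itertools import combinations
--
-- def solution(relation):
--     answer = 0
--     n = len(relation)
--     m = len(relation[0])
--
--     combi = []
--     for i in range(1, n+1):
--         combi.extend(combinations(range(m), i))
--
--     key = []
--     for c in combi:
--         result = set()
--
--         for i in range(n):
--             temp = []
--             for j in c:
--                 temp.append(relation[i][j])
--             result.add(tuple(temp))
--
--         if len(result) == n:
--             flag = True
--             for i in range(len(key)):
--                 if key[i].issubset(set(c)):
--                     flag = False
--                     break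
--
--             if flag:
--                 key.append(set(c))
--                 answer += 1
--
--     return answer
-- ===== SOURCE B (Python) =====
-- from itertools import combinations
--
--
-- def solution(relation):
--     n = len(relation)
--     m = len(relation[0])
--     # Phase 1: collect every column combination (sizes 1..n, as in A) whose
--     # projection is unique over the rows.
--     supers = set()
--     for size in range(1, n + 1):
--         for c in combinations(range(m), size):
--             if len({tuple(row[j] for j in c) for row in relation}) == n:
--                 supers.add(frozenset(c))
--     # Phase 2: count the minimal ones.  A super key is minimal iff removing any
--     # single column never yields another super key (supersets of a unique
--     # combination are unique, so a strict subset in supers implies a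
--     # one-column-removed one).
--     return sum(1 for c in supers if not any(c - {x} in supers for x in c))
-- ===== Notes on version B (the rewrite author's own statement) =====
-- stated objective: alternative
-- what changed: A interleaves uniqueness testing and minimality filtering in one pass, checking each candidate against the list of keys accepted so far; B is two separate phases: first build the set of all unique column combinations (sizes 1..n, as in A), then count those that are minimal, i.e. removing any single column never yields another member of that precomputed set.
import Mathlib
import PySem

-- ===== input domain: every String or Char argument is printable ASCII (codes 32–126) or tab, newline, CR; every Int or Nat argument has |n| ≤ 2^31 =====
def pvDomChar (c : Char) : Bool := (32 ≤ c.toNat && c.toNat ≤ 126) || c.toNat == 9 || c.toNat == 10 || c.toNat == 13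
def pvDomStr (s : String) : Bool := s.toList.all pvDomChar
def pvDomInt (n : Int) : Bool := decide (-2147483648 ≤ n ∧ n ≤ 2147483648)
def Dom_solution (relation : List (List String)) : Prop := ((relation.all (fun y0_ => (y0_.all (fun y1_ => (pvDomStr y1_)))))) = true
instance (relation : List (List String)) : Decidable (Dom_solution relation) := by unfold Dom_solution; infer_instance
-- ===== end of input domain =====

-- B splits A's single interleaved pass into two phases (collect all unique column
-- combinations, then count the minimal ones); same return value on Pre_.

-- ===== PORT A =====
-- shared helper: itertools.combinations over a list (itertools order); both Pythons call it
def pyCombos : Nat → List Int → List (List Int)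
  | 0, _ => [[]]
  | _+1, [] => []
  | k+1, x :: xs => (pyCombos k xs).map (fun t => x :: t) ++ pyCombos (k+1) xs

-- 'temp = [relation[i][j] for j in c]' is the inner append loop, written as the map it builds;
-- relation[i][j] is in range on Pre_, so pyGetD is exact there.
def solution (relation : List (List String)) : Int :=
  let n := relation.length
  let m := (PySem.List.pyGetD relation 0 ([] : List String)).length
  let combi : List (List Int) :=
    (PySem.List.pyRange 1 ((n : Int) + 1)).flatMap
      (fun i => pyCombos i.toNat (PySem.List.pyRange 0 (m : Int)))
  (combi.foldl
    (fun (st : Int × List (PySem.Set Int)) c =>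
      let result : PySem.Set (List String) :=
        (PySem.List.pyRange 0 (n : Int)).foldl
          (fun r i =>
            PySem.Set.add r
              (c.map (fun j => PySem.List.pyGetD (PySem.List.pyGetD relation i []) j "")))
          PySem.Set.empty
      if PySem.Set.len result = (n : Int) then
        if st.2.any (fun k => PySem.Set.issubset k (PySem.Set.ofList c)) then st
        else (st.1 + 1, st.2 ++ [PySem.Set.ofList c])
      else st)
    (0, [])).1

-- ===== PORT B =====
-- frozenset(c) is represented by the combination tuple c itself: combinations yields strictly
-- increasing tuples, which are canonical for their element sets (distinct tuples ↔ distinct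
-- frozensets); 'c - {x}' for x ∈ c is then 'c.erase x' (still increasing, hence canonical) and
-- 'in supers' is Set.contains.  The final sum over the set 'supers' is a pure count, and the
-- inner any ranges over the tuple c, so nothing depends on Python's set iteration order.
def solution_alt (relation : List (List String)) : Int :=
  let n := relation.length
  let m := (PySem.List.pyGetD relation 0 ([] : List String)).length
  let supers : PySem.Set (List Int) :=
    (PySem.List.pyRange 1 ((n : Int) + 1)).foldl
      (fun sup size =>
        (pyCombos size.toNat (PySem.List.pyRange 0 (m : Int))).foldl
          (fun sup c =>
            if PySem.Set.len (PySem.Set.ofList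
                (relation.map (fun row => c.map (fun j => PySem.List.pyGetD row j "")))) = (n : Int)
            then PySem.Set.add sup c else sup)
          sup)
      PySem.Set.empty
  ((supers.countP
    (fun c => !(c.any (fun x => PySem.Set.contains supers (c.erase x)))) : Nat) : Int)

-- ===== PRECONDITION & SPEC =====
-- Pre_ excludes exactly the inputs where the Python raises IndexError: the empty relation
-- (relation[0]) and relations where some row is shorter than row 0 (relation[i][j], j < m).
def Pre_solution (relation : List (List String)) : Prop :=
  relation ≠ [] ∧ ∀ r ∈ relation, (PySem.List.pyGetD relation 0 ([] : List String)).length ≤ r.length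
instance (relation : List (List String)) : Decidable (Pre_solution relation) := by
  unfold Pre_solution; infer_instance
def pvWitness_solution : List (List String) := [["a", "b"], ["b", "b"]]

def Spec_solution (relation : List (List String)) (out : Int) : Prop := out = solution_alt relation
instance (relation : List (List String)) (out : Int) : Decidable (Spec_solution relation out) := by
  unfold Spec_solution; infer_instance

-- ===== CLAIM (what is proved, stated in full; the proofs are below) =====
def Claim_equal_solution : Prop := ∀ (relation : List (List String)), Dom_solution relation → Pre_solution relation → Spec_solution relation (solution relation)

-- ===== LEMMAS AND PROOFS =====

-- proof-side vocabulary
def projB (relation : List (List String)) (c : List Int) : List (List String) :=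
  relation.map (fun row => c.map (fun j => PySem.List.pyGetD row j ""))

def uniqB (relation : List (List String)) (c : List Int) : Bool :=
  decide (PySem.Set.len (PySem.Set.ofList (projB relation c)) = (relation.length : Int))

def combiL (relation : List (List String)) : List (List Int) :=
  (PySem.List.pyRange 1 ((relation.length : Int) + 1)).flatMap
    (fun i => pyCombos i.toNat
      (PySem.List.pyRange 0 (((PySem.List.pyGetD relation 0 ([] : List String)).length : Int))))

def strictB (s c : List Int) : Bool := decide ((∀ x ∈ s, x ∈ c) ∧ s.length < c.length)

def MinB (relation : List (List String)) (c : List Int) : Bool :=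
  uniqB relation c && !((combiL relation).any (fun s => uniqB relation s && strictB s c))

def stepN (relation : List (List String)) (st : Int × List (List Int)) (c : List Int) :
    Int × List (List Int) :=
  if uniqB relation c = true then
    if st.2.any (fun k => PySem.Set.issubset k c) then st
    else (st.1 + 1, st.2 ++ [c])
  else st

-- pyRange facts
lemma pyRange_nil {a b : Int} (h : b ≤ a) : PySem.List.pyRange a b = [] := by
  simp [PySem.List.pyRange]; omega

lemma pyRange_pairwise_aux : ∀ (N : Nat) (a b : Int), (b - a).toNat ≤ N →
    (PySem.List.pyRange a b).Pairwise (· < ·) := by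
  intro N
  induction N with
  | zero => intro a b h; rw [pyRange_nil (by omega)]; exact List.Pairwise.nil
  | succ N ih =>
    intro a b h
    rcases lt_or_ge a b with hab | hba
    · rw [PySem.List.pyRange_one_cons hab]
      refine List.Pairwise.cons ?_ (ih (a+1) b (by omega))
      intro x hx
      have := PySem.List.mem_pyRange_one.mp hx
      omega
    · rw [pyRange_nil hba]; exact List.Pairwise.nil

lemma pyRange_pairwise_lt (a b : Int) : (PySem.List.pyRange a b).Pairwise (· < ·) :=
  pyRange_pairwise_aux (b - a).toNat a b le_rfl

-- pyCombos facts
lemma pyCombos_sublist : ∀ (xs : List Int) (k : Nat) (c : List Int),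
    c ∈ pyCombos k xs → c.Sublist xs := by
  intro xs
  induction xs with
  | nil =>
    intro k c hc
    cases k with
    | zero => simp [pyCombos] at hc; simp [hc]
    | succ k => simp [pyCombos] at hc
  | cons x xs ih =>
    intro k c hc
    cases k with
    | zero => simp [pyCombos] at hc; simp [hc]
    | succ k =>
      simp only [pyCombos, List.mem_append, List.mem_map] at hc
      rcases hc with ⟨t, ht, rfl⟩ | hc
      · exact (ih k t ht).cons₂ x
      · exact (ih (k+1) c hc).cons x

lemma pyCombos_length : ∀ (xs : List Int) (k : Nat) (c : List Int),
    c ∈ pyCombos k xs → c.length = k := by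
  intro xs
  induction xs with
  | nil =>
    intro k c hc
    cases k with
    | zero => simp [pyCombos] at hc; simp [hc]
    | succ k => simp [pyCombos] at hc
  | cons x xs ih =>
    intro k c hc
    cases k with
    | zero => simp [pyCombos] at hc; simp [hc]
    | succ k =>
      simp only [pyCombos, List.mem_append, List.mem_map] at hc
      rcases hc with ⟨t, ht, rfl⟩ | hc
      · simp [ih k t ht]
      · exact ih (k+1) c hc

lemma pyCombos_nodup : ∀ (xs : List Int), xs.Nodup → ∀ (k : Nat), (pyCombos k xs).Nodup := by
  intro xs
  induction xs with
  | nil =>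
    intro _ k
    cases k with
    | zero => simp [pyCombos]
    | succ k => simp [pyCombos]
  | cons x xs ih =>
    intro h k
    have hx : x ∉ xs := (List.nodup_cons.mp h).1
    have hxs : xs.Nodup := (List.nodup_cons.mp h).2
    cases k with
    | zero => simp [pyCombos]
    | succ k =>
      simp only [pyCombos]
      rw [List.nodup_append]
      refine ⟨(ih hxs k).map ?_ , ih hxs (k+1), ?_⟩
      · intro a b hab; injection hab
      · intro a ha b hb
        simp only [List.mem_map] at ha
        obtain ⟨t, _, rfl⟩ := ha
        have hbs := pyCombos_sublist xs (k+1) b hb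
        intro hEq
        have : x ∈ b := by rw [← hEq]; simp
        exact hx (hbs.subset this)

-- combiL facts
lemma mem_combiL_sorted {relation : List (List String)} {c : List Int}
    (h : c ∈ combiL relation) : c.Pairwise (· < ·) := by
  simp only [combiL, List.mem_flatMap] at h
  obtain ⟨i, _, hc⟩ := h
  exact List.Pairwise.sublist (pyCombos_sublist _ _ _ hc) (pyRange_pairwise_lt 0 _)

lemma mem_combiL_nodup {relation : List (List String)} {c : List Int}
    (h : c ∈ combiL relation) : c.Nodup :=
  (mem_combiL_sorted h).imp (fun hx => ne_of_lt hx)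

lemma combiL_nodup (relation : List (List String)) : (combiL relation).Nodup := by
  unfold combiL
  rw [List.nodup_flatMap]
  constructor
  · intro i _
    exact pyCombos_nodup _ ((pyRange_pairwise_lt 0 _).imp (fun hx => ne_of_lt hx)) _
  · refine (pyRange_pairwise_lt 1 _).imp_of_mem ?_
    intro a b ha hb hab x hxa hxb
    have h1 := pyCombos_length _ _ _ hxa
    have h2 := pyCombos_length _ _ _ hxb
    have ha1 := (PySem.List.mem_pyRange_one.mp ha).1
    omega

lemma combiL_pairwise_len (relation : List (List String)) :
    (combiL relation).Pairwise (fun x y => x.length ≤ y.length) := by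
  unfold combiL
  rw [List.pairwise_flatMap]
  constructor
  · intro i _
    refine List.pairwise_of_forall_mem_list ?_
    intro a ha b hb
    rw [pyCombos_length _ _ _ ha, pyCombos_length _ _ _ hb]
  · refine (pyRange_pairwise_lt 1 _).imp_of_mem ?_
    intro a b ha hb hab x hxa y hxy
    have h1 := pyCombos_length _ _ _ hxa
    have h2 := pyCombos_length _ _ _ hxy
    have ha1 := (PySem.List.mem_pyRange_one.mp ha).1
    omega

-- subset fact for sorted duplicate-free lists
lemma subset_ne_lt {s c : List Int} (hs : s.Pairwise (· < ·)) (hc : c.Pairwise (· < ·))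
    (hsub : ∀ x ∈ s, x ∈ c) (hne : s ≠ c) : s.length < c.length := by
  have hsnd : s.Nodup := hs.imp (fun hx => ne_of_lt hx)
  have hsp := hsnd.subperm (fun x hx => hsub x hx)
  rcases Nat.lt_or_ge s.length c.length with hlt | hge
  · exact hlt
  · exfalso
    have hperm : s.Perm c := hsp.perm_of_length_le hge
    have e1 := PySem.List.sorted_eq_of_perm_of_pairwise_lt c s (fun x => x) hperm hs
    have e2 := PySem.List.sorted_eq_of_perm_of_pairwise_lt c c (fun x => x) (List.Perm.refl c) hc
    exact hne (e1.symm.trans e2)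

-- A-side: the port computes the fold of stepN over combiL
lemma solutionA_eq (relation : List (List String)) :
    solution relation = ((combiL relation).foldl (stepN relation) (0, [])).1 := by
  have hres : ∀ c : List Int,
      (PySem.List.pyRange 0 (relation.length : Int)).foldl
        (fun r i => PySem.Set.add r
          (c.map (fun j => PySem.List.pyGetD (PySem.List.pyGetD relation i ([] : List String)) j "")))
        PySem.Set.empty = PySem.Set.ofList (projB relation c) := by
    intro c
    rw [← PySem.Set.update_map_eq_foldl_add, PySem.Set.update_empty]
    congr 1
    have hrel : relation = (PySem.List.pyRange 0 (relation.length : Int)).map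
        (fun i => PySem.List.pyGetD relation i ([] : List String)) := by
      have h := PySem.List.map_pyGetD_pyRange_zero relation ([] : List String)
      simp only [PySem.List.len] at h
      exact h.symm
    unfold projB
    conv_rhs => rw [hrel]
    rw [List.map_map]
    rfl
  simp only [solution]
  refine congrArg Prod.fst (PySem.List.foldl_congr_mem _ _ _ _ ?_)
  intro acc c hc
  have hnd : c.Nodup := mem_combiL_nodup hc
  rw [hres c]
  simp only [stepN, uniqB, decide_eq_true_eq, PySem.Set.ofList_eq_self_of_nodup _ hnd]

-- a fold that conditionally adds fresh elements to a set is a filter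
lemma foldl_if_add_eq_filter {P : List Int → Prop} [DecidablePred P] :
    ∀ (l : List (List Int)) (acc : PySem.Set (List Int)),
      (∀ x ∈ l, x ∉ acc) → l.Nodup →
      l.foldl (fun s c => if P c then PySem.Set.add s c else s) acc
        = acc ++ l.filter (fun c => decide (P c)) := by
  intro l
  induction l with
  | nil => intro acc _ _; simp
  | cons c l ih =>
    intro acc hfresh hnd
    simp only [List.foldl_cons, List.filter_cons]
    by_cases hP : P c
    · rw [if_pos hP, PySem.Set.add_of_not_mem (hfresh c (by simp))]
      rw [ih (acc ++ [c]) ?_ (List.nodup_cons.mp hnd).2]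
      · simp [hP]
      · intro x hx
        simp only [List.mem_append, List.mem_singleton]
        rintro (hxa | rfl)
        · exact hfresh x (by simp [hx]) hxa
        · exact (List.nodup_cons.mp hnd).1 hx
    · rw [if_neg hP, ih acc (fun x hx => hfresh x (by simp [hx])) (List.nodup_cons.mp hnd).2]
      simp [hP]

-- B-side: supers is the filter of combiL, the sum is a countP
lemma solutionB_eq (relation : List (List String)) :
    solution_alt relation =
      ((((combiL relation).filter (fun c => uniqB relation c)).countP
        (fun c => !(c.any (fun x => PySem.Set.contains
          ((combiL relation).filter (fun c => uniqB relation c)) (c.erase x)))) : Nat) : Int) := by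
  simp only [solution_alt]
  rw [← List.foldl_flatMap]
  have hsup := foldl_if_add_eq_filter
    (P := fun c : List Int => PySem.Set.len (PySem.Set.ofList
        (relation.map (fun row => c.map (fun j => PySem.List.pyGetD row j "")))) = (relation.length : Int))
    (combiL relation) PySem.Set.empty (by intro x _ hx; simp [PySem.Set.empty] at hx) (combiL_nodup relation)
  beta_reduce at hsup
  rw [show (List.flatMap
        (fun size : Int => pyCombos size.toNat
          (PySem.List.pyRange 0 ((PySem.List.pyGetD relation 0 ([] : List String)).length : Int)))
        (PySem.List.pyRange 1 ((relation.length : Int) + 1))) = combiL relation from rfl,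
      hsup]
  rfl

-- the interleaved loop invariant
lemma foldA_inv (relation : List (List String)) :
    ∀ (rest pre : List (List Int)) (ans : Int) (key : List (List Int)),
      combiL relation = pre ++ rest →
      (∀ k ∈ key, k ∈ pre ∧ uniqB relation k = true ∧
        (∀ s ∈ combiL relation, uniqB relation s = true → strictB s k = false)) →
      (∀ s ∈ pre, uniqB relation s = true → ∃ k ∈ key, ∀ x ∈ k, x ∈ s) →
      (rest.foldl (stepN relation) (ans, key)).1 =
        ans + ((rest.countP (MinB relation) : Nat) : Int) := by
  intro rest
  induction rest with
  | nil => intro pre ans key _ _ _; simp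
  | cons c rest ih =>
    intro pre ans key hsplit hkey hcov
    have hcL : c ∈ combiL relation := by rw [hsplit]; simp
    have hsplit' : combiL relation = (pre ++ [c]) ++ rest := by
      rw [hsplit, List.append_assoc]; rfl
    rw [List.foldl_cons]
    by_cases hu : uniqB relation c = true
    · by_cases hany : key.any (fun k => PySem.Set.issubset k c) = true
      · -- c is skipped: an earlier minimal key is a subset, hence a strict subset
        obtain ⟨k, hkmem, hksub⟩ := List.any_eq_true.mp hany
        obtain ⟨hkpre, hkuniq, _⟩ := hkey k hkmem
        have hkL : k ∈ combiL relation := by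
          rw [hsplit]; exact List.mem_append_left _ hkpre
        have hsub : ∀ x ∈ k, x ∈ c := (PySem.Set.issubset_iff k c).mp hksub
        have hkne : k ≠ c := by
          have hnd := combiL_nodup relation
          rw [hsplit] at hnd
          exact (List.nodup_append.mp hnd).2.2 k hkpre c (by simp)
        have hklt : k.length < c.length :=
          subset_ne_lt (mem_combiL_sorted hkL) (mem_combiL_sorted hcL) hsub hkne
        have hMin : MinB relation c = false := by
          have hA : (combiL relation).any (fun s => uniqB relation s && strictB s c) = true := by
            refine List.any_eq_true.mpr ⟨k, hkL, ?_⟩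
            simp only [hkuniq, strictB, decide_eq_true_eq, Bool.true_and]
            exact ⟨hsub, hklt⟩
          simp [MinB, hA]
        have hstep : stepN relation (ans, key) c = (ans, key) := by
          simp [stepN, hu, hany]
        rw [hstep, ih (pre ++ [c]) ans key hsplit'
            (fun k' hk' => ⟨List.mem_append_left _ (hkey k' hk').1,
              (hkey k' hk').2.1, (hkey k' hk').2.2⟩)
            ?_, List.countP_cons]
        · simp [hMin]
        · intro s hs hsu
          rcases List.mem_append.mp hs with hsp | hsc
          · exact hcov s hsp hsu
          · rw [List.mem_singleton] at hsc
            subst hsc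
            exact ⟨k, hkmem, hsub⟩
      · -- c is a new minimal key
        have hall : ∀ k ∈ key, PySem.Set.issubset k c = false := by
          intro k hk
          cases h : PySem.Set.issubset k c with
          | false => rfl
          | true => exact absurd (List.any_eq_true.mpr ⟨k, hk, h⟩) hany
        have hminC : ∀ s ∈ combiL relation, uniqB relation s = true → strictB s c = false := by
          intro s hsL hsu
          cases hst : strictB s c with
          | false => rfl
          | true =>
            exfalso
            simp only [strictB, decide_eq_true_eq] at hst
            obtain ⟨hsub, hlt⟩ := hst
            have hspre : s ∈ pre := by
              rw [hsplit] at hsL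
              rcases List.mem_append.mp hsL with hp | hcr
              · exact hp
              · rcases List.mem_cons.mp hcr with rfl | hr
                · omega
                · have hpw := combiL_pairwise_len relation
                  rw [hsplit] at hpw
                  have h2 := (List.pairwise_append.mp hpw).2.1
                  have h3 := (List.pairwise_cons.mp h2).1 s hr
                  omega
            obtain ⟨k, hk, hks⟩ := hcov s hspre hsu
            have hkc : PySem.Set.issubset k c = true :=
              (PySem.Set.issubset_iff k c).mpr (fun x hx => hsub x (hks x hx))
            rw [hall k hk] at hkc
            cases hkc
        have hMin : MinB relation c = true := by
          simp only [MinB, hu, Bool.true_and, Bool.not_eq_true']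
          cases hA : (combiL relation).any (fun s => uniqB relation s && strictB s c) with
          | false => rfl
          | true =>
            obtain ⟨s, hsL, hst⟩ := List.any_eq_true.mp hA
            rw [Bool.and_eq_true] at hst
            rw [hminC s hsL hst.1] at hst
            exact absurd hst.2 (by simp)
        have hstep : stepN relation (ans, key) c = (ans + 1, key ++ [c]) := by
          simp [stepN, hu, hany]
        rw [hstep, ih (pre ++ [c]) (ans + 1) (key ++ [c]) hsplit' ?_ ?_, List.countP_cons]
        · simp only [hMin, if_pos]
          push_cast
          ring
        · intro k' hk'
          rcases List.mem_append.mp hk' with hko | hkc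
          · exact ⟨List.mem_append_left _ (hkey k' hko).1,
              (hkey k' hko).2.1, (hkey k' hko).2.2⟩
          · rw [List.mem_singleton] at hkc
            subst hkc
            exact ⟨by simp, hu, hminC⟩
        · intro s hs hsu
          rcases List.mem_append.mp hs with hsp | hsc
          · obtain ⟨k, hk, hks⟩ := hcov s hsp hsu
            exact ⟨k, List.mem_append_left _ hk, hks⟩
          · rw [List.mem_singleton] at hsc
            subst hsc
            exact ⟨s, by simp, fun x hx => hx⟩
    · -- projection not unique: c ignored
      have hu' : uniqB relation c = false := by
        revert hu; cases uniqB relation c <;> simp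
      have hMin : MinB relation c = false := by simp [MinB, hu']
      have hstep : stepN relation (ans, key) c = (ans, key) := by
        simp [stepN, hu']
      rw [hstep, ih (pre ++ [c]) ans key hsplit'
          (fun k' hk' => ⟨List.mem_append_left _ (hkey k' hk').1,
            (hkey k' hk').2.1, (hkey k' hk').2.2⟩)
          ?_, List.countP_cons]
      · simp [hMin]
      · intro s hs hsu
        rcases List.mem_append.mp hs with hsp | hsc
        · exact hcov s hsp hsu
        · rw [List.mem_singleton] at hsc
          subst hsc
          rw [hu'] at hsu
          cases hsu

-- completeness of the combinations enumeration
lemma pyCombos_complete : ∀ (xs c : List Int), c.Sublist xs → c ∈ pyCombos c.length xs := by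
  intro xs
  induction xs with
  | nil =>
    intro c hc
    rw [List.sublist_nil] at hc
    subst hc
    simp [pyCombos]
  | cons x xs ih =>
    intro c hc
    cases hc with
    | cons _ h =>
      cases c with
      | nil => simp [pyCombos]
      | cons a t =>
        simp only [List.length_cons, pyCombos, List.mem_append]
        exact Or.inr (ih (a :: t) h)
    | cons₂ _ h =>
      rename_i t
      simp only [List.length_cons, pyCombos, List.mem_append, List.mem_map]
      exact Or.inl ⟨t, ih t h, rfl⟩

lemma mem_combiL_sublist {relation : List (List String)} {c : List Int}
    (h : c ∈ combiL relation) :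
    c.Sublist (PySem.List.pyRange 0
      (((PySem.List.pyGetD relation 0 ([] : List String)).length : Int))) := by
  simp only [combiL, List.mem_flatMap] at h
  obtain ⟨i, _, hc⟩ := h
  exact pyCombos_sublist _ _ _ hc

lemma mem_combiL_bounds {relation : List (List String)} {c : List Int}
    (h : c ∈ combiL relation) : 1 ≤ c.length ∧ c.length ≤ relation.length := by
  simp only [combiL, List.mem_flatMap] at h
  obtain ⟨i, hi, hc⟩ := h
  have hl := pyCombos_length _ _ _ hc
  rw [PySem.List.mem_pyRange_one] at hi
  omega

lemma mem_combiL_of (relation : List (List String)) {c : List Int}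
    (hsub : c.Sublist (PySem.List.pyRange 0
      (((PySem.List.pyGetD relation 0 ([] : List String)).length : Int))))
    (h1 : 1 ≤ c.length) (h2 : c.length ≤ relation.length) : c ∈ combiL relation := by
  simp only [combiL, List.mem_flatMap]
  refine ⟨(c.length : Int), ?_, ?_⟩
  · rw [PySem.List.mem_pyRange_one]
    omega
  · have ht : ((c.length : Int)).toNat = c.length := by omega
    rw [ht]
    exact pyCombos_complete _ _ hsub

-- set(xs) is a subsequence of xs, so with equal length it is xs itself
lemma ofList_sublist {α : Type} [BEq α] [LawfulBEq α] :
    ∀ (xs : List α), (PySem.Set.ofList xs).Sublist xs := by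
  intro xs
  induction xs using List.reverseRecOn with
  | nil => simp
  | append_singleton xs x ih =>
    rw [PySem.Set.ofList_append_singleton, PySem.Set.add_eq_ite]
    by_cases hx : x ∈ PySem.Set.ofList xs
    · rw [if_pos hx]
      exact ih.trans (List.sublist_append_left xs [x])
    · rw [if_neg hx]
      exact ih.append (List.Sublist.refl [x])

lemma uniq_nodup {relation : List (List String)} {c : List Int}
    (h : uniqB relation c = true) : (projB relation c).Nodup := by
  simp only [uniqB, decide_eq_true_eq, PySem.Set.len] at h
  have h' : (PySem.Set.ofList (projB relation c)).length = relation.length := by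
    exact_mod_cast h
  have hmap : (projB relation c).length = relation.length := by simp [projB]
  have heq := (ofList_sublist (projB relation c)).eq_of_length (h'.trans hmap.symm)
  rw [← heq]
  exact PySem.Set.nodup_ofList _

-- uniqueness of the projection is monotone in the column set
lemma uniq_mono (relation : List (List String)) {s c : List Int}
    (hsub : ∀ x ∈ s, x ∈ c) (hs : uniqB relation s = true) : uniqB relation c = true := by
  have hnds : (projB relation s).Nodup := uniq_nodup hs
  have hndc : (projB relation c).Nodup := by
    unfold projB at hnds ⊢
    refine List.pairwise_map.mpr ((List.pairwise_map.mp hnds).imp ?_)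
    intro a b hne heq
    apply hne
    refine List.map_inj_left.mpr ?_
    intro j hj
    exact List.map_inj_left.mp heq j (hsub j hj)
  simp only [uniqB, decide_eq_true_eq]
  rw [PySem.Set.ofList_eq_self_of_nodup _ hndc]
  simp [PySem.Set.len, projB]

-- the two counts coincide
lemma counts_eq (relation : List (List String)) :
    (((combiL relation).filter (fun c => uniqB relation c)).countP
      (fun c => !(c.any (fun x => PySem.Set.contains
        ((combiL relation).filter (fun c => uniqB relation c)) (c.erase x)))))
      = (combiL relation).countP (MinB relation) := by
  rw [List.countP_filter]
  refine List.countP_congr ?_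
  intro c hc
  have hAny : ((c.any (fun x => PySem.Set.contains
        ((combiL relation).filter (fun c => uniqB relation c)) (c.erase x))) = true) ↔
      ((combiL relation).any (fun s => uniqB relation s && strictB s c)) = true := by
    simp only [List.any_eq_true, Bool.and_eq_true]
    have hcnd := mem_combiL_nodup hc
    constructor
    · rintro ⟨x, hx, hmem⟩
      rw [PySem.Set.contains_iff, List.mem_filter] at hmem
      refine ⟨c.erase x, hmem.1, hmem.2, ?_⟩
      simp only [strictB, decide_eq_true_eq]
      refine ⟨fun y hy => (hcnd.mem_erase_iff.mp hy).2, ?_⟩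
      have h1 := List.length_erase_of_mem hx
      have h2 : 1 ≤ c.length := List.length_pos_of_mem hx
      omega
    · rintro ⟨s, hsL, hsu, hst⟩
      simp only [strictB, decide_eq_true_eq] at hst
      obtain ⟨hsub, hlt⟩ := hst
      have hex : ∃ x ∈ c, x ∉ s := by
        by_contra hno
        have hno' : ∀ x ∈ c, x ∈ s := by
          intro x hx
          by_contra hxs
          exact hno ⟨x, hx, hxs⟩
        have := (hcnd.subperm hno').length_le
        omega
      obtain ⟨x, hxc, hxs⟩ := hex
      refine ⟨x, hxc, ?_⟩
      rw [PySem.Set.contains_iff, List.mem_filter]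
      have hsubE : ∀ y ∈ s, y ∈ c.erase x := fun y hy =>
        hcnd.mem_erase_iff.mpr ⟨fun h => hxs (h ▸ hy), hsub y hy⟩
      have hb1 := (mem_combiL_bounds hsL).1
      have hb2 := (mem_combiL_bounds hc).2
      have hlen := List.length_erase_of_mem hxc
      constructor
      · refine mem_combiL_of relation
          ((List.erase_sublist).trans (mem_combiL_sublist hc)) (by omega) (by omega)
      · exact uniq_mono relation hsubE hsu
  simp only [MinB, Bool.and_eq_true, Bool.not_eq_true']
  constructor
  · rintro ⟨hq, hu⟩
    refine ⟨hu, ?_⟩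
    cases hA2 : ((combiL relation).any (fun s => uniqB relation s && strictB s c))
    · rfl
    · exact absurd (hAny.mpr hA2) (by rw [hq]; simp)
  · rintro ⟨hu, hq⟩
    refine ⟨?_, hu⟩
    cases hA1 : (c.any (fun x => PySem.Set.contains
        ((combiL relation).filter (fun c => uniqB relation c)) (c.erase x)))
    · rfl
    · exact absurd (hAny.mp hA1) (by rw [hq]; simp)

-- ===== VERDICT (by name: the statement is the Claim_ definition above) =====
theorem solution_spec : Claim_equal_solution := by
  intro relation _ _
  unfold Spec_solution
  rw [solutionA_eq, solutionB_eq, counts_eq,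
    foldA_inv relation (combiL relation) [] 0 [] (by simp) (by simp) (by simp)]
  simp
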